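-- pv_equiv track=rewrite | github.com/safety-research/talkative-probes | stegdecode.py | extract_binary_from_spaces
-- ===== SOURCE A (Python) =====
-- def extract_binary_from_spaces(text):
--     """
--     Extract binary data from spaces after punctuation marks.
--     - One space after punctuation = 0
--     - Two spaces after punctuation = 1
--
--     Args:
--         text (str): Text containing encoded binary data
--
--     Returns:
--         str: Binary string (e.g., "01001010")
--     """
--     binary_data = []
--
--     # Look for punctuation marks followed by spaces
--     i = 0
--     while i < len(text) - 1:
--         if text[i] in ['.', ',', ';', ':']:
--             # Count spaces after punctuation
--             space_count = 0
--             j = i + 1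
--             while j < len(text) and text[j] == ' ':
--                 space_count += 1
--                 j += 1
--
--             # Encode: 1 space = 0, 2 spaces = 1
--             if space_count == 1:
--                 binary_data.append('0')
--             elif space_count == 2:
--                 binary_data.append('1')
--
--             i = j - 1  # Move to the last space
--         i += 1
--
--     return ''.join(binary_data)
-- ===== SOURCE B (Python) =====
-- def extract_binary_from_spaces(text):
--     """Single-pass state machine: track the length of the space run that
--     follows a punctuation mark; flush one bit when the run ends."""
--     bits = []
--     counting = False  # inside the space run after a punctuation mark
--     run = 0
--     for c in text:
--         if counting:
--             if c == ' ':
--                 run += 1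
--                 continue
--             if run == 1:
--                 bits.append('0')
--             elif run == 2:
--                 bits.append('1')
--             counting = False
--         if c in '.,;:':
--             counting = True
--             run = 0
--     if counting:
--         if run == 1:
--             bits.append('0')
--         elif run == 2:
--             bits.append('1')
--     return ''.join(bits)
-- ===== Notes on version B (the rewrite author's own statement) =====
-- stated objective: alternative
-- what changed: Replaced A's index-jumping while loop with a nested space-counting scan by a single linear pass state machine that tracks the current space-run length after a punctuation mark and flushes one bit when the run ends.
import Mathlib
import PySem

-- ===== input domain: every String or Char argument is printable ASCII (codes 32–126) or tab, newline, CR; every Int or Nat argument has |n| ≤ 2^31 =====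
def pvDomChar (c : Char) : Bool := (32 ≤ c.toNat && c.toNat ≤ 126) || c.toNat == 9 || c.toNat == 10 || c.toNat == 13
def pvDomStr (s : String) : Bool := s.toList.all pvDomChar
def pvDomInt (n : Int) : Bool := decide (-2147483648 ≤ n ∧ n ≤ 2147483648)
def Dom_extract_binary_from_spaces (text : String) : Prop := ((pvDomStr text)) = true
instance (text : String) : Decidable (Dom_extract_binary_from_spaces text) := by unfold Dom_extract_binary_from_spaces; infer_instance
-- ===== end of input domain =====

-- B replaces A's index-jumping scan (inner while counting spaces, then jump) by a
-- single-pass state machine over the characters; alternative structure, same cost.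


-- ===== PORT A =====
-- A: index-driven while loop; on punctuation, an inner while counts the following
-- spaces, a bit is appended for 1 or 2 spaces, and the index jumps past the spaces.

-- inner while: `while j < len(text) and text[j] == ' ': space_count += 1; j += 1`
def pvAcountSpaces (s : List Char) (j : Nat) : Nat :=
  if h : j < s.length then
    if s.getD j ' ' == ' ' then 1 + pvAcountSpaces s (j + 1) else 0
  else 0
termination_by s.length - j

-- outer while: `while i < len(text) - 1`; `i = j - 1` then `i += 1` resumes at j = i+1+sc
def pvAloop (s : List Char) (i : Nat) : List Char :=
  if h : i < s.length - 1 then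
    if [ '.', ',', ';', ':' ].contains (s.getD i ' ') then
      let sc := pvAcountSpaces s (i + 1)
      (if sc = 1 then ['0'] else if sc = 2 then ['1'] else []) ++ pvAloop s (i + 1 + sc)
    else pvAloop s (i + 1)
  else []
termination_by s.length - i

def extract_binary_from_spaces (text : String) : String :=
  String.ofList (pvAloop text.toList 0)

-- ===== PORT B =====
-- B: one fold over the characters with state (bits, counting, run).
def pvBpunct (c : Char) : Bool := c == '.' || c == ',' || c == ';' || c == ':'

def pvBemit (run : Nat) : List Char :=
  if run = 1 then ['0'] else if run = 2 then ['1'] else []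

def pvBstep (st : List Char × Bool × Nat) (c : Char) : List Char × Bool × Nat :=
  if st.2.1 && c == ' ' then (st.1, true, st.2.2 + 1)
  else
    let bits := if st.2.1 then st.1 ++ pvBemit st.2.2 else st.1
    (bits, pvBpunct c, 0)

def extract_binary_from_spaces_alt (text : String) : String :=
  let fin := text.toList.foldl pvBstep ([], false, 0)
  String.ofList (if fin.2.1 then fin.1 ++ pvBemit fin.2.2 else fin.1)

-- ===== PRECONDITION & SPEC =====
def Spec_extract_binary_from_spaces (text : String) (out : String) : Prop := out = extract_binary_from_spaces_alt text
instance (text : String) (out : String) : Decidable (Spec_extract_binary_from_spaces text out) := by unfold Spec_extract_binary_from_spaces; infer_instance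

-- ===== CLAIM (what is proved, stated in full; the proofs are below) =====
def Claim_equal_extract_binary_from_spaces : Prop := ∀ (text : String), Dom_extract_binary_from_spaces text → Spec_extract_binary_from_spaces text (extract_binary_from_spaces text)

-- ===== LEMMAS AND PROOFS =====

-- proof-side structural version of A's loop
def pvAlist : List Char → List Char
  | [] => []
  | c :: cs =>
    if cs = [] then []
    else if [ '.', ',', ';', ':' ].contains c then
      let sc := (cs.takeWhile (· == ' ')).length
      pvBemit sc ++ pvAlist (cs.drop sc)
    else pvAlist cs
termination_by cs => cs.length
decreasing_by
  · simp only [List.length_cons, List.length_drop]; omega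
  · simp

-- proof-side unfolded fold: g cs counting run
def pvG : List Char → Bool → Nat → List Char
  | [], b, r => if b then pvBemit r else []
  | c :: cs, b, r =>
    if b && c == ' ' then pvG cs true (r + 1)
    else (if b then pvBemit r else []) ++ pvG cs (pvBpunct c) 0

theorem pvG_foldl (cs : List Char) (bits : List Char) (b : Bool) (r : Nat) :
    (let fin := cs.foldl pvBstep (bits, b, r);
     if fin.2.1 then fin.1 ++ pvBemit fin.2.2 else fin.1) = bits ++ pvG cs b r := by
  induction cs generalizing bits b r with
  | nil => cases b <;> simp [pvG]
  | cons c cs ih =>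
    simp only [List.foldl_cons, pvBstep, pvG]
    by_cases hb : b = true
    · subst hb
      by_cases hc : c == ' '
      · simp [hc, ih]
      · simp only [hc, Bool.true_and, if_neg, Bool.false_eq_true, not_false_iff]
        simp [ih, List.append_assoc]
    · simp only [Bool.not_eq_true] at hb; subst hb
      simp [ih]

theorem pvBpunct_eq (c : Char) :
    [ '.', ',', ';', ':' ].contains c = pvBpunct c := by
  simp only [pvBpunct, List.contains_cons, List.contains_nil, Bool.or_false, Bool.or_assoc]

-- g with counting=false ignores run and equals A's structural loop;
-- g with counting=true consumes the leading space run.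
theorem pvG_spec (cs : List Char) : ∀ (b : Bool) (r : Nat),
    pvG cs b r = if b then
        pvBemit (r + (cs.takeWhile (· == ' ')).length) ++
          pvAlist (cs.drop (cs.takeWhile (· == ' ')).length)
      else pvAlist cs := by
  induction cs with
  | nil => intro b r; cases b <;> simp [pvG, pvAlist]
  | cons c cs ih =>
    intro b r
    by_cases hsp : c == ' '
    · have hc : c = ' ' := by exact beq_iff_eq.mp hsp
      subst hc
      cases b with
      | false =>
        -- ' ' is not punctuation
        simp only [pvG, Bool.false_and, if_neg, Bool.false_eq_true, not_false_iff,
          if_false, List.nil_append]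
        have hp : pvBpunct ' ' = false := by decide
        rw [hp, ih false 0]
        cases cs with
        | nil => simp [pvAlist]
        | cons d ds => simp [pvAlist]
      | true =>
        simp only [pvG, Bool.true_and, if_pos (by decide : (' ' == ' ') = true)]
        rw [ih true (r + 1)]
        simp only [List.takeWhile_cons, if_pos (by decide : (' ' == ' ') = true)]
        simp [Nat.add_assoc, Nat.add_comm 1]
    · -- c is not a space: any pending run is flushed, then A re-examines c
      have hAeq : pvAlist (c :: cs) = pvG cs (pvBpunct c) 0 := by
        cases cs with
        | nil =>
          cases hpc : pvBpunct c <;>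
            simp [pvAlist, pvG, pvBemit]
        | cons d ds =>
          rw [ih (pvBpunct c) 0]
          cases hpc : pvBpunct c with
          | false =>
            simp only [pvAlist, if_neg (by simp : ¬(d :: ds = []))]
            rw [pvBpunct_eq, hpc]; simp
          | true =>
            simp only [pvAlist, if_neg (by simp : ¬(d :: ds = []))]
            rw [pvBpunct_eq, hpc]; simp
      cases b with
      | false =>
        simp only [pvG, Bool.false_and, if_neg, Bool.false_eq_true, not_false_iff,
          if_false, List.nil_append]
        exact hAeq.symm
      | true =>
        simp only [pvG, Bool.true_and, hsp, if_neg, Bool.false_eq_true, not_false_iff]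
        simp only [List.takeWhile_cons, hsp, if_neg, Bool.false_eq_true, not_false_iff]
        simp [hAeq]

theorem pvAcountSpaces_eq (s : List Char) (j : Nat) :
    pvAcountSpaces s j = ((s.drop j).takeWhile (· == ' ')).length := by
  fun_induction pvAcountSpaces s j with
  | case1 j h hsp ih =>
    have hdrop : s.drop j = s[j] :: s.drop (j + 1) := List.drop_eq_getElem_cons h
    rw [List.getD_eq_getElem s ' ' h] at hsp
    rw [hdrop, List.takeWhile_cons, if_pos hsp, List.length_cons, ih]
    omega
  | case2 j h hsp =>
    have hdrop : s.drop j = s[j] :: s.drop (j + 1) := List.drop_eq_getElem_cons h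
    rw [List.getD_eq_getElem s ' ' h] at hsp
    rw [hdrop, List.takeWhile_cons, if_neg hsp]
    rfl
  | case3 j h =>
    have : s.drop j = [] := List.drop_eq_nil_of_le (by omega)
    simp [this]

theorem pvAloop_eq (s : List Char) (i : Nat) :
    pvAloop s i = pvAlist (s.drop i) := by
  fun_induction pvAloop s i with
  | case1 i h hp sc ih =>
    have hi : i < s.length := by omega
    have hdrop : s.drop i = s[i] :: s.drop (i + 1) := List.drop_eq_getElem_cons hi
    have hne : s.drop (i + 1) ≠ [] := by
      have hlen : (s.drop (i + 1)).length = s.length - (i + 1) := List.length_drop ..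
      intro hnil; rw [hnil] at hlen; simp at hlen; omega
    rw [List.getD_eq_getElem s ' ' hi] at hp
    rw [hdrop, pvAlist, if_neg hne, if_pos hp]
    have hsc : sc = ((s.drop (i + 1)).takeWhile (· == ' ')).length :=
      pvAcountSpaces_eq s (i + 1)
    rw [ih]
    simp only [List.drop_drop, pvBemit]
    rw [← hsc]
  | case2 i h hp ih =>
    have hi : i < s.length := by omega
    have hdrop : s.drop i = s[i] :: s.drop (i + 1) := List.drop_eq_getElem_cons hi
    have hne : s.drop (i + 1) ≠ [] := by
      have hlen : (s.drop (i + 1)).length = s.length - (i + 1) := List.length_drop ..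
      intro hnil; rw [hnil] at hlen; simp at hlen; omega
    rw [List.getD_eq_getElem s ' ' hi] at hp
    rw [hdrop, pvAlist, if_neg hne, if_neg hp, ih]
  | case3 i h =>
    rcases Nat.lt_or_ge i s.length with hlt | hge
    · have hdrop : s.drop i = s[i] :: s.drop (i + 1) := List.drop_eq_getElem_cons hlt
      have hnil : s.drop (i + 1) = [] := List.drop_eq_nil_of_le (by omega)
      rw [hdrop, hnil, pvAlist]
      simp
    · have : s.drop i = [] := List.drop_eq_nil_of_le hge
      simp [this, pvAlist]

-- ===== VERDICT (by name: the statement is the Claim_ definition above) =====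
theorem extract_binary_from_spaces_spec : Claim_equal_extract_binary_from_spaces := by
  intro text _
  unfold Spec_extract_binary_from_spaces extract_binary_from_spaces extract_binary_from_spaces_alt
  show String.ofList (pvAloop text.toList 0) =
    String.ofList (let fin := text.toList.foldl pvBstep ([], false, 0);
      if fin.2.1 then fin.1 ++ pvBemit fin.2.2 else fin.1)
  rw [pvG_foldl, pvAloop_eq, List.drop_zero]
  have h2 := pvG_spec text.toList false 0
  simp only [Bool.false_eq_true, if_false] at h2
  rw [h2]
  simp
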